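-- pv_equiv track=rewrite | github.com/marinred/coding | week_3/다트게임.py | solution
-- ===== SOURCE A (Python) =====
-- def solution(dartResult):
--     nums = []
--     temp = 0
--     strNums = 0
--
--     for i in dartResult:
--         if "0" <= i <= "9":
--             temp = temp * 10 + int(i)
--         elif i == "S":
--             nums.append(temp)
--             temp = 0
--             strNums += 1
--         elif i == "D":
--             nums.append(temp** 2)
--             temp = 0
--             strNums += 1
--         elif i == "T":
--             nums.append(temp ** 3)
--             temp = 0
--             strNums += 1
--         elif i == "*":
--             if strNums > 1:
--                 nums[strNums - 2] *= 2
--             nums[strNums - 1] *= 2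
--         elif i == "#":
--             nums[strNums - 1] *= -1
--     return sum(nums)
-- ===== SOURCE B (Python) =====
-- def solution(dartResult):
--     # Pass 1: parse into base scores (one per S/D/T letter) and option events (char, #letters so far).
--     bases = []
--     opts = []
--     num = 0
--     for ch in dartResult:
--         if '0' <= ch <= '9':
--             num = num * 10 + int(ch)
--         elif ch in 'SDT':
--             bases.append(num ** (1 if ch == 'S' else 2 if ch == 'D' else 3))
--             num = 0
--         elif ch in '*#':
--             opts.append((ch, len(bases)))
--     # Pass 2: turn the option events into per-token multipliers, then dot-product.
--     mult = [1] * len(bases)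
--     for ch, k in opts:
--         if ch == '*':
--             mult[k - 1] *= 2
--             if k > 1:
--                 mult[k - 2] *= 2
--         else:
--             mult[k - 1] *= -1
--     return sum(b * m for b, m in zip(bases, mult))
-- ===== Notes on version B (the rewrite author's own statement) =====
-- stated objective: alternative
-- what changed: B separates parsing from scoring: one pass records the base score per S/D/T letter and the '*'/'#' events with the token count at their position, a second pass turns the events into per-token multipliers and returns the dot product of bases and multipliers, instead of A's single pass that mutates the score list in place at each option character.
-- outside the precondition, e.g. on solution('*'): A raises IndexError, B raises IndexError; on solution('#'): A raises IndexError, B raises IndexError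
import Mathlib
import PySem

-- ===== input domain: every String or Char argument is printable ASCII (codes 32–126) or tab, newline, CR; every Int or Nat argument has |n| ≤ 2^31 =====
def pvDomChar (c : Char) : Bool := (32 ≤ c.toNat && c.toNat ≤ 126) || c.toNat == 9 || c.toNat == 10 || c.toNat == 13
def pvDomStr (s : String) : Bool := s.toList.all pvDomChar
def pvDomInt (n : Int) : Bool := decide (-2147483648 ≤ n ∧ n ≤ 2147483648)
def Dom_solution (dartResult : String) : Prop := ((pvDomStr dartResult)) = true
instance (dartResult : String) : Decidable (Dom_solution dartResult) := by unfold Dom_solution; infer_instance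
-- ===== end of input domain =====

-- B separates parsing from scoring: one pass records base scores and option events, a second
-- pass turns the events into per-token multipliers and returns the dot product — instead of A's
-- single pass mutating the score list in place (alternative decomposition, same cost).


-- Python `xs[i] *= m` (both Pythons use it), as a total stand-in: where the index is invalid
-- Python raises IndexError; those inputs are excluded by Pre_solution.
def pyMulAt (xs : List Int) (i : Int) (m : Int) : List Int :=
  PySem.List.pySetD xs i (PySem.List.pyGetD xs i 0 * m)

-- ===== PORT A =====
-- loop body of A's `for i in dartResult`; state = (nums, temp, strNums).
-- `int(i)` on a single digit char is ported as c.toNat - 48 (exact on '0'..'9', the only chars reaching it).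
def stepA (st : List Int × Int × Int) (c : Char) : List Int × Int × Int :=
  if '0' ≤ c ∧ c ≤ '9' then (st.1, st.2.1 * 10 + ((c.toNat : Int) - 48), st.2.2)
  else if c = 'S' then (st.1 ++ [st.2.1], 0, st.2.2 + 1)
  else if c = 'D' then (st.1 ++ [st.2.1 ^ 2], 0, st.2.2 + 1)
  else if c = 'T' then (st.1 ++ [st.2.1 ^ 3], 0, st.2.2 + 1)
  else if c = '*' then
    (pyMulAt (if st.2.2 > 1 then pyMulAt st.1 (st.2.2 - 2) 2 else st.1) (st.2.2 - 1) 2, st.2.1, st.2.2)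
  else if c = '#' then (pyMulAt st.1 (st.2.2 - 1) (-1), st.2.1, st.2.2)
  else st

def solution (dartResult : String) : Int :=
  (dartResult.toList.foldl stepA ([], 0, 0)).1.sum

-- ===== PORT B =====
-- `ch in 'SDT'` / `ch in '*#'` on a single ASCII char:
def isBonus (c : Char) : Bool := c = 'S' || c = 'D' || c = 'T'
def isOpt (c : Char) : Bool := c = '*' || c = '#'

-- B's pass 1: state = (bases, num, opts); opts records (option char, len(bases) at that time).
def stepB1 (st : List Int × Int × List (Char × Int)) (c : Char) : List Int × Int × List (Char × Int) :=
  if '0' ≤ c ∧ c ≤ '9' then (st.1, st.2.1 * 10 + ((c.toNat : Int) - 48), st.2.2)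
  else if isBonus c then
    (st.1 ++ [st.2.1 ^ (if c = 'S' then 1 else if c = 'D' then 2 else 3)], 0, st.2.2)
  else if isOpt c then (st.1, st.2.1, st.2.2 ++ [(c, (st.1.length : Int))])
  else st

-- B's pass 2 loop body: one option event applied to the multiplier list.
def step2 (mult : List Int) (p : Char × Int) : List Int :=
  if p.1 = '*' then
    let m1 := pyMulAt mult (p.2 - 1) 2
    if p.2 > 1 then pyMulAt m1 (p.2 - 2) 2 else m1
  else pyMulAt mult (p.2 - 1) (-1)

def solution_alt (dartResult : String) : Int :=
  let st := dartResult.toList.foldl stepB1 ([], 0, [])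
  let mult := st.2.2.foldl step2 (List.replicate st.1.length 1)
  ((st.1.zip mult).map (fun p => p.1 * p.2)).sum

-- ===== PRECONDITION & SPEC =====
-- Pre_ excludes exactly the strings with a '*' or '#' before the first S/D/T: there A raises
-- IndexError (its score list is still empty); everywhere A returns normally, Pre_ holds.
def Pre_solution (dartResult : String) : Prop :=
  (dartResult.toList.takeWhile (fun c => !isBonus c)).all (fun c => !isOpt c) = true
instance (dartResult : String) : Decidable (Pre_solution dartResult) := by
  unfold Pre_solution; infer_instance

def pvWitness_solution : String := "1S2D*3T"

def Spec_solution (dartResult : String) (out : Int) : Prop := out = solution_alt dartResult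
instance (dartResult : String) (out : Int) : Decidable (Spec_solution dartResult out) := by
  unfold Spec_solution; infer_instance

-- ===== CLAIM (what is proved, stated in full; the proofs are below) =====
def Claim_equal_solution : Prop := ∀ (dartResult : String), Dom_solution dartResult → Pre_solution dartResult → Spec_solution dartResult (solution dartResult)

-- ===== LEMMAS AND PROOFS =====

-- B's scored list after a prefix: bases pointwise times the multipliers from the events so far
-- (this is exactly the expression inside solution_alt).
def zipMul (bases mult : List Int) : List Int := (bases.zip mult).map (fun p => p.1 * p.2)

def applyOpts (opts : List (Char × Int)) (bases : List Int) : List Int :=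
  zipMul bases (opts.foldl step2 (List.replicate bases.length 1))

theorem isBonus_of_digit {c : Char} (h : '0' ≤ c ∧ c ≤ '9') : isBonus c = false := by
  obtain ⟨h1, h2⟩ := h
  simp only [isBonus, Bool.or_eq_false_iff, decide_eq_false_iff_not]
  refine ⟨⟨?_, ?_⟩, ?_⟩ <;> rintro rfl <;> revert h1 h2 <;> decide

theorem length_pyMulAt (xs : List Int) (i v : Int) : (pyMulAt xs i v).length = xs.length := by
  simp only [pyMulAt, PySem.List.pySetD, PySem.List.pySet?]
  cases h : PySem.List.pyIdx? xs.length i <;> simp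

-- pyMulAt at a valid non-negative index is a List.set
theorem pyMulAt_int (xs : List Int) (i v : Int) (h0 : 0 ≤ i) (hn : i.toNat < xs.length) :
    pyMulAt xs i v = xs.set i.toNat (xs[i.toNat] * v) := by
  rw [pyMulAt, PySem.List.pyGetD_eq_getElem xs 0 h0 (by omega),
    PySem.List.pySetD_of_nonneg xs _ h0]

theorem length_foldl_step2 (opts : List (Char × Int)) (m : List Int) :
    (opts.foldl step2 m).length = m.length := by
  induction opts generalizing m with
  | nil => rfl
  | cons p opts ih =>
    rw [List.foldl_cons, ih]
    simp only [step2]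
    split_ifs <;> simp [length_pyMulAt]

theorem length_zipMul (bases m : List Int) (h : m.length = bases.length) :
    (zipMul bases m).length = bases.length := by
  simp [zipMul, h]

theorem zipMul_pyMulAt (bases m : List Int) (i v : Int) (hlen : m.length = bases.length)
    (h0 : 0 ≤ i) (hn : i.toNat < m.length) :
    zipMul bases (pyMulAt m i v) = pyMulAt (zipMul bases m) i v := by
  rw [pyMulAt_int m i v h0 hn,
    pyMulAt_int (zipMul bases m) i v h0 (by rw [length_zipMul bases m hlen]; omega)]
  apply List.ext_getElem
  · simp [zipMul, hlen]
  · intro k h1 h2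
    have hkb : k < bases.length := by simpa [zipMul, hlen] using h2
    have hkm : k < m.length := by omega
    simp only [zipMul, List.getElem_map, List.getElem_zip, List.getElem_set]
    rcases eq_or_ne i.toNat k with rfl | hk
    · simp [mul_assoc]
    · simp [hk]

theorem pyMulAt_comm (xs : List Int) (i j v w : Int) (h0i : 0 ≤ i) (hi : i.toNat < xs.length)
    (h0j : 0 ≤ j) (hj : j.toNat < xs.length) (hne : i ≠ j) :
    pyMulAt (pyMulAt xs i v) j w = pyMulAt (pyMulAt xs j w) i v := by
  have hab : i.toNat ≠ j.toNat := by omega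
  rw [pyMulAt_int xs i v h0i hi, pyMulAt_int _ j w h0j (by simpa using hj),
    pyMulAt_int xs j w h0j hj, pyMulAt_int _ i v h0i (by simpa using hi)]
  rw [List.getElem_set_ne hab, List.getElem_set_ne (Ne.symm hab)]
  exact List.set_comm _ _ hab

theorem pyMulAt_append_frozen (m : List Int) (y : Int) (i v : Int) (h0 : 0 ≤ i)
    (hn : i.toNat < m.length) :
    pyMulAt (m ++ [y]) i v = pyMulAt m i v ++ [y] := by
  rw [pyMulAt_int (m ++ [y]) i v h0 (by simp; omega), pyMulAt_int m i v h0 hn]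
  rw [List.getElem_append_left hn]
  rw [List.set_append_left _ _ hn]

theorem step2_append (m : List Int) (y : Int) (p : Char × Int) (h1 : 1 ≤ p.2)
    (h2 : p.2 ≤ (m.length : Int)) :
    step2 (m ++ [y]) p = step2 m p ++ [y] := by
  rw [step2, step2]
  split_ifs
  · rw [pyMulAt_append_frozen m y _ _ (by omega) (by omega)]
    rw [pyMulAt_append_frozen _ y _ _ (by omega) (by rw [length_pyMulAt]; omega)]
  · rw [pyMulAt_append_frozen m y _ _ (by omega) (by omega)]
  · rw [pyMulAt_append_frozen m y _ _ (by omega) (by omega)]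

theorem foldl_step2_append (opts : List (Char × Int)) (m : List Int) (y : Int)
    (h : ∀ p ∈ opts, 1 ≤ p.2 ∧ p.2 ≤ (m.length : Int)) :
    opts.foldl step2 (m ++ [y]) = opts.foldl step2 m ++ [y] := by
  induction opts generalizing m with
  | nil => rfl
  | cons p opts ih =>
    obtain ⟨h1, h2⟩ := h p List.mem_cons_self
    rw [List.foldl_cons, List.foldl_cons, step2_append m y p h1 h2]
    apply ih
    intro q hq
    have := h q (List.mem_cons_of_mem _ hq)
    have hl : (step2 m p).length = m.length := by
      rw [step2]; split_ifs <;> simp [length_pyMulAt]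
    rw [hl]
    exact this

theorem applyOpts_append (opts : List (Char × Int)) (bases : List Int) (x : Int)
    (h : ∀ p ∈ opts, 1 ≤ p.2 ∧ p.2 ≤ (bases.length : Int)) :
    applyOpts opts (bases ++ [x]) = applyOpts opts bases ++ [x] := by
  rw [applyOpts, applyOpts, List.length_append, List.length_singleton,
    List.replicate_succ', foldl_step2_append opts _ 1 (by simpa using h)]
  rw [zipMul, zipMul,
    List.zip_append (by rw [length_foldl_step2, List.length_replicate]),
    List.map_append]
  simp

theorem step2_star (m : List Int) (k : Int) :
    step2 m ('*', k) = if k > 1 then pyMulAt (pyMulAt m (k - 1) 2) (k - 2) 2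
      else pyMulAt m (k - 1) 2 := by
  rw [step2]; simp

theorem step2_hash (m : List Int) (k : Int) :
    step2 m ('#', k) = pyMulAt m (k - 1) (-1) := by
  rw [step2]; simp

-- one recorded '*' event applied to the scored list is exactly A's '*' branch
theorem applyOpts_snoc_star (opts : List (Char × Int)) (bases : List Int)
    (hne : bases ≠ []) :
    applyOpts (opts ++ [('*', (bases.length : Int))]) bases
      = pyMulAt (if (bases.length : Int) > 1
            then pyMulAt (applyOpts opts bases) ((bases.length : Int) - 2) 2
            else applyOpts opts bases) ((bases.length : Int) - 1) 2 := by
  have hn1 : 1 ≤ bases.length := List.length_pos_iff.mpr hne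
  have hM : (opts.foldl step2 (List.replicate bases.length 1)).length = bases.length := by
    rw [length_foldl_step2, List.length_replicate]
  rw [applyOpts, applyOpts, List.foldl_append, List.foldl_cons, List.foldl_nil, step2_star]
  by_cases h2 : (bases.length : Int) > 1
  · rw [if_pos h2, if_pos h2]
    rw [zipMul_pyMulAt bases _ _ _ (by rw [length_pyMulAt]; exact hM) (by omega)
        (by rw [length_pyMulAt]; omega),
      zipMul_pyMulAt bases _ _ _ hM (by omega) (by omega)]
    rw [pyMulAt_comm _ _ _ _ _ (by omega) (by rw [length_zipMul _ _ hM]; omega)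
        (by omega) (by rw [length_zipMul _ _ hM]; omega) (by omega)]
  · rw [if_neg h2, if_neg h2]
    rw [zipMul_pyMulAt bases _ _ _ hM (by omega) (by omega)]

-- one recorded '#' event applied to the scored list is exactly A's '#' branch
theorem applyOpts_snoc_hash (opts : List (Char × Int)) (bases : List Int)
    (hne : bases ≠ []) :
    applyOpts (opts ++ [('#', (bases.length : Int))]) bases
      = pyMulAt (applyOpts opts bases) ((bases.length : Int) - 1) (-1) := by
  have hn1 : 1 ≤ bases.length := List.length_pos_iff.mpr hne
  have hM : (opts.foldl step2 (List.replicate bases.length 1)).length = bases.length := by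
    rw [length_foldl_step2, List.length_replicate]
  rw [applyOpts, applyOpts, List.foldl_append, List.foldl_cons, List.foldl_nil, step2_hash]
  rw [zipMul_pyMulAt bases _ _ _ hM (by omega) (by omega)]

-- peeling one non-bonus, non-option character off the precondition
theorem takeWhile_pass {c : Char} {cs : List Char} (hb : isBonus c = false)
    (h : ((c :: cs).takeWhile (fun c => !isBonus c)).all (fun c => !isOpt c) = true) :
    isOpt c = false ∧ (cs.takeWhile (fun c => !isBonus c)).all (fun c => !isOpt c) = true := by
  rw [List.takeWhile_cons] at h
  simp only [hb, Bool.not_false, if_true, List.all_cons, Bool.and_eq_true,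
    Bool.not_eq_true'] at h
  exact h

-- the invariant: A's state after any prefix is (B's scored list, B's num, number of bases)
theorem main_inv (cs : List Char) : ∀ (bases : List Int) (num : Int) (opts : List (Char × Int)),
    (bases = [] → (cs.takeWhile (fun c => !isBonus c)).all (fun c => !isOpt c) = true) →
    (∀ p ∈ opts, 1 ≤ p.2 ∧ p.2 ≤ (bases.length : Int)) →
    cs.foldl stepA (applyOpts opts bases, num, (bases.length : Int))
      = (applyOpts (cs.foldl stepB1 (bases, num, opts)).2.2 (cs.foldl stepB1 (bases, num, opts)).1,
         (cs.foldl stepB1 (bases, num, opts)).2.1,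
         (((cs.foldl stepB1 (bases, num, opts)).1.length : Int))) := by
  induction cs with
  | nil =>
    intro bases num opts _ _
    simp [List.foldl_nil]
  | cons c cs ih =>
    intro bases num opts hC hvalid
    simp only [List.foldl_cons]
    by_cases hdig : ('0' ≤ c ∧ c ≤ '9')
    · -- digit: both sides accumulate num
      rw [stepA, if_pos hdig]
      rw [stepB1, if_pos hdig]
      exact ih bases _ opts
        (fun hb => (takeWhile_pass (isBonus_of_digit hdig) (hC hb)).2) hvalid
    · by_cases hbon : isBonus c = true
      · -- bonus letter: a new base score is appended on both sides
        have hb' : c = 'S' ∨ c = 'D' ∨ c = 'T' := by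
          simp only [isBonus, Bool.or_eq_true, decide_eq_true_eq] at hbon; tauto
        have hvalid' : ∀ p ∈ opts, 1 ≤ p.2 ∧ p.2 ≤ (((bases ++ [num ^ (if c = 'S' then 1 else if c = 'D' then 2 else 3)]).length : Nat) : Int) := by
          intro p hp
          obtain ⟨u, w⟩ := hvalid p hp
          refine ⟨u, ?_⟩
          simp only [List.length_append, List.length_singleton]
          push_cast; omega
        have happ := applyOpts_append opts bases
          (num ^ (if c = 'S' then 1 else if c = 'D' then 2 else 3)) hvalid
        have hcast : (bases.length : Int) + 1
            = (((bases ++ [num ^ (if c = 'S' then 1 else if c = 'D' then 2 else 3)]).length : Nat) : Int) := by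
          simp
        have hstep := ih (bases ++ [num ^ (if c = 'S' then 1 else if c = 'D' then 2 else 3)]) 0 opts
          (fun hb => absurd hb (by simp)) hvalid'
        rw [happ] at hstep
        rcases hb' with rfl | rfl | rfl
        · rw [stepA, if_neg hdig, if_pos rfl]
          rw [stepB1, if_neg hdig, if_pos hbon]
          have he : (num ^ (if ('S' : Char) = 'S' then 1 else if ('S' : Char) = 'D' then 2 else 3)) = num := by
            rw [if_pos rfl, pow_one]
          rw [he] at hstep hcast ⊢
          rw [hcast, hstep]
        · rw [stepA, if_neg hdig, if_neg (by decide), if_pos rfl]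
          rw [stepB1, if_neg hdig, if_pos hbon]
          have he : (num ^ (if ('D' : Char) = 'S' then 1 else if ('D' : Char) = 'D' then 2 else 3)) = num ^ 2 := by
            rw [if_neg (by decide), if_pos rfl]
          rw [he] at hstep hcast ⊢
          rw [hcast, hstep]
        · rw [stepA, if_neg hdig, if_neg (by decide), if_neg (by decide), if_pos rfl]
          rw [stepB1, if_neg hdig, if_pos hbon]
          have he : (num ^ (if ('T' : Char) = 'S' then 1 else if ('T' : Char) = 'D' then 2 else 3)) = num ^ 3 := by
            rw [if_neg (by decide), if_neg (by decide)]
          rw [he] at hstep hcast ⊢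
          rw [hcast, hstep]
      · have hbon' : isBonus c = false := by simpa using hbon
        by_cases hopt : isOpt c = true
        · -- option char: recorded by B, applied in place by A
          have hne : bases ≠ [] := by
            intro hb
            have := (takeWhile_pass hbon' (hC hb)).1
            rw [hopt] at this; exact absurd this (by decide)
          have hn1 : 1 ≤ bases.length := List.length_pos_iff.mpr hne
          have ho' : c = '*' ∨ c = '#' := by
            simp only [isOpt, Bool.or_eq_true, decide_eq_true_eq] at hopt; tauto
          have hvalid' : ∀ p ∈ opts ++ [(c, (bases.length : Int))],
              1 ≤ p.2 ∧ p.2 ≤ (bases.length : Int) := by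
            intro p hp
            rcases List.mem_append.mp hp with hp | hp
            · exact hvalid p hp
            · simp only [List.mem_singleton] at hp
              subst hp
              exact ⟨by push_cast; omega, le_refl _⟩
          have hstep := ih bases num (opts ++ [(c, (bases.length : Int))])
            (fun hb => absurd hb hne) hvalid'
          rcases ho' with rfl | rfl
          · have hA : stepA (applyOpts opts bases, num, (bases.length : Int)) '*'
                = (pyMulAt (if (bases.length : Int) > 1
                      then pyMulAt (applyOpts opts bases) ((bases.length : Int) - 2) 2
                      else applyOpts opts bases) ((bases.length : Int) - 1) 2,
                   num, (bases.length : Int)) := by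
              rw [stepA, if_neg hdig, if_neg (by decide), if_neg (by decide), if_neg (by decide),
                if_pos rfl]
            have hB : stepB1 (bases, num, opts) '*'
                = (bases, num, opts ++ [('*', (bases.length : Int))]) := by
              rw [stepB1, if_neg hdig, if_neg (by decide), if_pos hopt]
            rw [hA, hB]
            rw [applyOpts_snoc_star opts bases hne] at hstep
            exact hstep
          · have hA : stepA (applyOpts opts bases, num, (bases.length : Int)) '#'
                = (pyMulAt (applyOpts opts bases) ((bases.length : Int) - 1) (-1),
                   num, (bases.length : Int)) := by
              rw [stepA, if_neg hdig, if_neg (by decide), if_neg (by decide), if_neg (by decide),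
                if_neg (by decide), if_pos rfl]
            have hB : stepB1 (bases, num, opts) '#'
                = (bases, num, opts ++ [('#', (bases.length : Int))]) := by
              rw [stepB1, if_neg hdig, if_neg (by decide), if_pos hopt]
            rw [hA, hB]
            rw [applyOpts_snoc_hash opts bases hne] at hstep
            exact hstep
        · -- any other character is ignored by both sides
          have hopt' : isOpt c = false := by simpa using hopt
          have hS : ¬ (c = 'S') := by intro h; rw [h] at hbon'; exact absurd hbon' (by decide)
          have hD : ¬ (c = 'D') := by intro h; rw [h] at hbon'; exact absurd hbon' (by decide)
          have hT : ¬ (c = 'T') := by intro h; rw [h] at hbon'; exact absurd hbon' (by decide)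
          have hst : ¬ (c = '*') := by intro h; rw [h] at hopt'; exact absurd hopt' (by decide)
          have hha : ¬ (c = '#') := by intro h; rw [h] at hopt'; exact absurd hopt' (by decide)
          have hA : stepA (applyOpts opts bases, num, (bases.length : Int)) c
              = (applyOpts opts bases, num, (bases.length : Int)) := by
            rw [stepA, if_neg hdig, if_neg hS, if_neg hD, if_neg hT, if_neg hst, if_neg hha]
          have hB : stepB1 (bases, num, opts) c = (bases, num, opts) := by
            rw [stepB1, if_neg hdig, if_neg (by simp [hbon']), if_neg (by simp [hopt'])]
          rw [hA, hB]
          exact ih bases num opts (fun hb => (takeWhile_pass hbon' (hC hb)).2) hvalid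

-- ===== VERDICT (by name: the statement is the Claim_ definition above) =====
theorem solution_spec : Claim_equal_solution := by
  intro s _ hpre
  unfold Spec_solution solution solution_alt
  have := main_inv s.toList [] 0 [] (fun _ => hpre) (by simp)
  simp only [applyOpts, zipMul, List.replicate, List.foldl_nil, List.zip_nil_right,
    List.map_nil, List.length_nil, Nat.cast_zero] at this
  rw [this]
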